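-- pv_equiv track=rewrite | github.com/gabrielbtera/game-6561 | atv.py | deslizar_para_baixo
-- ===== SOURCE A (Python) =====
-- def deslizar_para_baixo(matriz):
--     # Define uma variável para armazenar se houve deslizamento ou não
--     houve_deslizamento = False
--     # Percorre a matriz coluna por coluna, de baixo para cima
--     for coluna in range(len(matriz[0])):
--         # Inicializa uma lista para armazenar os valores não nulos da coluna
--         valores_nao_nulos = []
--         # Percorre a coluna e adiciona os valores não nulos à lista
--         for linha in range(len(matriz) - 1, -1, -1):
--             if matriz[linha][coluna] != 0:
--                 valores_nao_nulos.append(matriz[linha][coluna])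
--         # Percorre a coluna novamente, de baixo para cima, e substitui os valores pelo próximo valor não nulo da lista, ou zero se não houver mais valores não nulos
--         for linha in range(len(matriz) - 1, -1, -1):
--             if linha >= len(matriz) - len(valores_nao_nulos):
--                 if matriz[linha][coluna] != valores_nao_nulos[len(valores_nao_nulos) - 1 - (linha - (len(matriz) - len(valores_nao_nulos)))]:
--                     houve_deslizamento = True
--                 matriz[linha][coluna] = valores_nao_nulos[len(valores_nao_nulos) - 1 - (linha - (len(matriz) - len(valores_nao_nulos)))]
--             else:
--                 if matriz[linha][coluna] != 0:
--                     houve_deslizamento = True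
--                 matriz[linha][coluna] = 0
--     # Retorna uma tupla com a matriz deslizada para baixo e o valor booleano indicando se houve deslizamento ou não
--     return (matriz, houve_deslizamento)
-- ===== SOURCE B (Python) =====
-- def deslizar_para_baixo(matriz):
--     # In-place two-pointer compaction per column (mutates matriz, like the original).
--     houve_deslizamento = False
--     n = len(matriz)
--     for coluna in range(len(matriz[0])):
--         escrita = n - 1
--         for linha in range(n - 1, -1, -1):
--             valor = matriz[linha][coluna]
--             if valor != 0:
--                 if matriz[escrita][coluna] != valor:
--                     houve_deslizamento = True
--                 matriz[escrita][coluna] = valor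
--                 escrita -= 1
--         for linha in range(escrita, -1, -1):
--             if matriz[linha][coluna] != 0:
--                 houve_deslizamento = True
--             matriz[linha][coluna] = 0
--     return (matriz, houve_deslizamento)
-- ===== Notes on version B (the rewrite author's own statement) =====
-- stated objective: faster
-- what changed: Replaces A's per-column two-pass scheme (collect non-zeros into a list bottom-up, then rewrite every cell via reverse-index arithmetic into that list) by an in-place two-pointer compaction: one bottom-up scan moves each non-zero to a write pointer, then the cells above the pointer are zeroed; the flag is set exactly when a written cell's old content differs.
import Mathlib
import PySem

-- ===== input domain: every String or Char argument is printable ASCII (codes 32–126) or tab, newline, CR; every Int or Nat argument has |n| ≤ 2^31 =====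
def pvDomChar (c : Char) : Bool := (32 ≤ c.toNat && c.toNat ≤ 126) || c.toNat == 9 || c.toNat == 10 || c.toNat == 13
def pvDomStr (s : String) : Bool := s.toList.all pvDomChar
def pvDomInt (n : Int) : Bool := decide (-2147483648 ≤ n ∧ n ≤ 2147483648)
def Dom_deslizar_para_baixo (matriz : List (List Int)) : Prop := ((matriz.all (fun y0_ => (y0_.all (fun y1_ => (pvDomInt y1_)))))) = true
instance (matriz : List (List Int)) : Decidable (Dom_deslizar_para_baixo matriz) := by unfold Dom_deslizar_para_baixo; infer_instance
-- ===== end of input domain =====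

-- B replaces A's per-column collect-then-rewrite (reverse-index arithmetic into the collected
-- list) by an in-place two-pointer compaction per column; same return value, same in-place
-- mutation in Python.

-- ===== PORT A =====
-- shared cell helpers: matriz[r][c] read (in range under Pre_) and matriz[r][c] = v write
def pvCellGet (m : List (List Int)) (r c : Nat) : Int := (m.getD r []).getD c 0
def pvCellSet (m : List (List Int)) (r c : Nat) (v : Int) : List (List Int) :=
  m.set r ((m.getD r []).set c v)
def deslizar_para_baixo (matriz : List (List Int)) : List (List Int) × Bool :=
  let n := matriz.length
  (List.range (matriz.headD []).length).foldl (fun st coluna =>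
    let vals : List Int := (List.range n).reverse.foldl
      (fun acc (linha : Nat) => if pvCellGet st.1 linha coluna ≠ 0 then acc ++ [pvCellGet st.1 linha coluna] else acc) []
    (List.range n).reverse.foldl (fun st2 (linha : Nat) =>
      if (linha : Int) ≥ (n : Int) - (vals.length : Int) then
        let v := PySem.List.pyGetD vals ((vals.length : Int) - 1 - ((linha : Int) - ((n : Int) - (vals.length : Int)))) 0
        (pvCellSet st2.1 linha coluna v, st2.2 || decide (pvCellGet st2.1 linha coluna ≠ v))
      else
        (pvCellSet st2.1 linha coluna 0, st2.2 || decide (pvCellGet st2.1 linha coluna ≠ 0))) st)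
    (matriz, false)


-- ===== PORT B =====
def deslizar_para_baixo_alt (matriz : List (List Int)) : List (List Int) × Bool :=
  let n := matriz.length
  (List.range (matriz.headD []).length).foldl (fun st coluna =>
    let p1 := (List.range n).reverse.foldl
      (fun (st2 : (List (List Int) × Bool) × Int) (linha : Nat) =>
        let valor := pvCellGet st2.1.1 linha coluna
        if valor ≠ 0 then
          ((pvCellSet st2.1.1 st2.2.toNat coluna valor,
            st2.1.2 || decide (pvCellGet st2.1.1 st2.2.toNat coluna ≠ valor)), st2.2 - 1)
        else st2)
      (st, (n : Int) - 1)
    (PySem.List.pyRange p1.2 (-1) (-1)).foldl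
      (fun st2 (linha : Int) =>
        (pvCellSet st2.1 linha.toNat coluna 0, st2.2 || decide (pvCellGet st2.1 linha.toNat coluna ≠ 0)))
      p1.1)
    (matriz, false)


-- ===== PRECONDITION & SPEC =====
-- Pre_ excludes exactly the inputs where the Python A raises IndexError: the empty matrix
-- (matriz[0]) and ragged matrices having a row shorter than row 0 (matriz[linha][coluna]).
def Pre_deslizar_para_baixo (matriz : List (List Int)) : Prop :=
  matriz ≠ [] ∧ ∀ row ∈ matriz, (matriz.headD []).length ≤ row.length
instance (matriz : List (List Int)) : Decidable (Pre_deslizar_para_baixo matriz) := by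
  unfold Pre_deslizar_para_baixo; infer_instance

def pvWitness_deslizar_para_baixo : List (List Int) := [[0, 3], [3, 0]]

def Spec_deslizar_para_baixo (matriz : List (List Int)) (out : List (List Int) × Bool) : Prop := out = deslizar_para_baixo_alt matriz
instance (matriz : List (List Int)) (out : List (List Int) × Bool) : Decidable (Spec_deslizar_para_baixo matriz out) := by unfold Spec_deslizar_para_baixo; infer_instance

-- ===== CLAIM (what is proved, stated in full; the proofs are below) =====
def Claim_equal_deslizar_para_baixo : Prop := ∀ (matriz : List (List Int)), Dom_deslizar_para_baixo matriz → Pre_deslizar_para_baixo matriz → Spec_deslizar_para_baixo matriz (deslizar_para_baixo matriz)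

-- ===== LEMMAS AND PROOFS =====
def pvRow (m : List (List Int)) (r : Nat) : List Int := m.getD r []
def pvWrite (c : Nat) (f : Nat → Int) (rs : List Nat) (m : List (List Int)) : List (List Int) :=
  rs.foldl (fun mm r => pvCellSet mm r c (f r)) m
def pvDiff (m : List (List Int)) (c : Nat) (f : Nat → Int) (r : Nat) : Bool :=
  decide (pvCellGet m r c ≠ f r)
def pvNZfrom (m : List (List Int)) (c j n : Nat) : List Int :=
  ((List.range' j (n - j)).map (fun r => pvCellGet m r c)).filter (fun v => decide (v ≠ 0))
def pvNZ (m : List (List Int)) (c n : Nat) : List Int := pvNZfrom m c 0 n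
def pvF (m : List (List Int)) (c n : Nat) (r : Nat) : Int :=
  if n ≤ r + (pvNZ m c n).length then (pvNZ m c n).getD (r - (n - (pvNZ m c n).length)) 0 else 0

theorem pvRow_set_ne (m : List (List Int)) (r c : Nat) (v : Int) (r' : Nat) (h : r' ≠ r) :
    pvRow (pvCellSet m r c v) r' = pvRow m r' := by
  simp [pvRow, pvCellSet, List.getD_eq_getElem?_getD, List.getElem?_set_ne (Ne.symm h)]

theorem pvCellGet_set_ne (m : List (List Int)) (r c : Nat) (v : Int) (r' c' : Nat) (h : r' ≠ r) :
    pvCellGet (pvCellSet m r c v) r' c' = pvCellGet m r' c' := by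
  have := pvRow_set_ne m r c v r' h
  simp only [pvRow] at this
  simp [pvCellGet, pvCellSet] at this ⊢
  rw [this]

theorem pvNZfrom_len_le (m : List (List Int)) (c j n : Nat) :
    (pvNZfrom m c j n).length ≤ n - j := by
  simpa [pvNZfrom] using (List.length_filter_le _ _).trans (by simp)

theorem pvNZ_len_le (m : List (List Int)) (c n : Nat) : (pvNZ m c n).length ≤ n := by
  simpa using pvNZfrom_len_le m c 0 n

theorem pvNZ_split (m : List (List Int)) (c n j : Nat) (h : j ≤ n) :
    pvNZ m c n
      = ((List.range' 0 j).map (fun r => pvCellGet m r c)).filter (fun v => decide (v ≠ 0))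
        ++ pvNZfrom m c j n := by
  have hr : List.range' 0 j ++ List.range' j (n - j) = List.range' 0 n := by
    have := List.range'_append (s := 0) (m := j) (n := n - j) (step := 1)
    simpa [Nat.add_sub_cancel' h] using this
  simp only [pvNZ, pvNZfrom, Nat.sub_zero, ← hr, List.map_append, List.filter_append]

theorem pvNZfrom_succ (m : List (List Int)) (c n j : Nat) (h : j < n) :
    pvNZfrom m c j n
      = (if pvCellGet m j c ≠ 0 then [pvCellGet m j c] else []) ++ pvNZfrom m c (j + 1) n := by
  have hr : List.range' j (n - j) = j :: List.range' (j + 1) (n - (j + 1)) := by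
    have : n - j = (n - (j + 1)) + 1 := by omega
    rw [this, List.range'_succ]
  rw [pvNZfrom, hr]
  by_cases hz : pvCellGet m j c ≠ 0 <;> simp [pvNZfrom, hz]

theorem pvRow_write_not_mem (c : Nat) (f : Nat → Int) :
    ∀ (rs : List Nat) (m : List (List Int)) (r : Nat), r ∉ rs →
    pvRow (pvWrite c f rs m) r = pvRow m r := by
  intro rs
  induction rs with
  | nil => intro m r _; rfl
  | cons a t ih =>
    intro m r hr
    simp only [pvWrite, List.foldl_cons]
    rw [show (List.foldl (fun mm r => pvCellSet mm r c (f r)) (pvCellSet m a c (f a)) t)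
        = pvWrite c f t (pvCellSet m a c (f a)) from rfl,
      ih _ r (fun hm => hr (List.mem_cons_of_mem a hm)),
      pvRow_set_ne _ _ _ _ _ (fun hh : r = a => hr (hh ▸ List.mem_cons_self))]

-- getD of (pre ++ v :: suf) at pre.length
theorem pvGetD_mid (pre suf : List Int) (v : Int) :
    (pre ++ v :: suf).getD pre.length 0 = v := by
  simp [List.getD_eq_getElem?_getD]

theorem pvPhase1 (m : List (List Int)) (c n : Nat) :
    ∀ j, j ≤ n → ∀ (m' : List (List Int)) (fl : Bool),
    (∀ i, i < n - (pvNZfrom m c j n).length → pvRow m' i = pvRow m i) →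
    (List.range j).reverse.foldl
      (fun (st2 : (List (List Int) × Bool) × Int) (linha : Nat) =>
        if pvCellGet st2.1.1 linha c ≠ 0 then
          ((pvCellSet st2.1.1 st2.2.toNat c (pvCellGet st2.1.1 linha c),
            st2.1.2 || decide (pvCellGet st2.1.1 st2.2.toNat c ≠ pvCellGet st2.1.1 linha c)), st2.2 - 1)
        else st2)
      ((m', fl), (n : Int) - 1 - ((pvNZfrom m c j n).length : Int))
    = ((pvWrite c (pvF m c n)
          ((List.range' (n - (pvNZ m c n).length) ((pvNZ m c n).length - (pvNZfrom m c j n).length)).reverse) m',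
        fl || ((List.range' (n - (pvNZ m c n).length) ((pvNZ m c n).length - (pvNZfrom m c j n).length)).reverse).any
          (pvDiff m c (pvF m c n))),
       (n : Int) - 1 - ((pvNZ m c n).length : Int)) := by
  intro j
  induction j with
  | zero =>
    intro _ m' fl _
    simp [pvWrite, pvNZ]
  | succ j ih =>
    intro hjn m' fl hrows
    have hk_le : (pvNZ m c n).length ≤ n := pvNZ_len_le m c n
    have hq1_le : (pvNZfrom m c (j+1) n).length ≤ n - (j+1) := pvNZfrom_len_le m c (j+1) n
    have hsplit := pvNZ_split m c n j (by omega)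
    have hsucc := pvNZfrom_succ m c n j (by omega)
    set k := (pvNZ m c n).length with hk
    set q1 := (pvNZfrom m c (j+1) n).length with hq1
    have hlist : (List.range (j+1)).reverse = j :: (List.range j).reverse := by
      simp [List.range_succ]
    rw [hlist, List.foldl_cons]
    have hvread : pvCellGet m' j c = pvCellGet m j c := by
      have := hrows j (by omega)
      simp only [pvRow] at this
      simp only [pvCellGet, this]
    by_cases hz : pvCellGet m j c ≠ 0
    · -- non-zero: write at n-1-q1, decrement pointer
      have hq0 : (pvNZfrom m c j n).length = q1 + 1 := by
        rw [hsucc]; simp [hz, ← hq1]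
      have hq0k : q1 + 1 ≤ k := by
        have : (pvNZ m c n).length
            = (((List.range' 0 j).map (fun r => pvCellGet m r c)).filter (fun v => decide (v ≠ 0))).length
              + (pvNZfrom m c j n).length := by rw [hsplit]; simp
        omega
      have hwnat : ((n : Int) - 1 - (q1 : Int)).toNat = n - 1 - q1 := by omega
      have hgoalF : pvF m c n (n - 1 - q1) = pvCellGet m j c := by
        have hlenpre : (((List.range' 0 j).map (fun r => pvCellGet m r c)).filter (fun v => decide (v ≠ 0))).length
            = k - (q1 + 1) := by
          have : (pvNZ m c n).length
              = (((List.range' 0 j).map (fun r => pvCellGet m r c)).filter (fun v => decide (v ≠ 0))).length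
                + (pvNZfrom m c j n).length := by rw [hsplit]; simp
          omega
        have hcond : n ≤ (n - 1 - q1) + k := by omega
        have hidx : (n - 1 - q1) - (n - k) = k - (q1 + 1) := by omega
        rw [pvF, if_pos hcond, hidx]
        have : pvNZ m c n
            = (((List.range' 0 j).map (fun r => pvCellGet m r c)).filter (fun v => decide (v ≠ 0)))
              ++ (pvCellGet m j c :: pvNZfrom m c (j+1) n) := by
          rw [hsplit, hsucc]; simp [hz]
        rw [this, ← hlenpre, pvGetD_mid]
      have hwread : pvCellGet m' (n - 1 - q1) c = pvCellGet m (n - 1 - q1) c := by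
        have := hrows (n - 1 - q1) (by omega)
        simp only [pvRow] at this
        simp only [pvCellGet, this]
      dsimp only
      rw [hvread, if_pos hz, hwnat, hwread]
      have hint : (n : Int) - 1 - (q1 : Int) - 1
          = (n : Int) - 1 - ((pvNZfrom m c j n).length : Int) := by
        rw [hq0]; push_cast; ring
      rw [hint]
      have hflag : (fl || decide (pvCellGet m (n - 1 - q1) c ≠ pvCellGet m j c))
          = (fl || pvDiff m c (pvF m c n) (n - 1 - q1)) := by
        simp only [pvDiff, hgoalF]
      rw [hflag]
      rw [ih (by omega) _ _ (by
        intro i hi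
        rw [pvRow_set_ne _ _ _ _ _ (by omega)]
        exact hrows i (by omega))]
      have hrange : List.range' (n - k) (k - q1)
          = List.range' (n - k) (k - (q1+1)) ++ [n - 1 - q1] := by
        have h1 : k - q1 = (k - (q1+1)) + 1 := by omega
        have h2 : (n - k) + 1 * (k - (q1+1)) = n - 1 - q1 := by omega
        rw [h1, List.range'_concat, h2]
      rw [hq0, hrange]
      simp only [List.reverse_append, List.reverse_cons, List.reverse_nil, List.nil_append,
        List.cons_append, List.any_cons]
      refine Prod.ext (Prod.ext ?_ ?_) rfl
      · show pvWrite c (pvF m c n) _ (pvCellSet m' (n-1-q1) c (pvCellGet m j c))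
          = pvWrite c (pvF m c n) ((n-1-q1) :: (List.range' (n - k) (k - (q1+1))).reverse) m'
        simp only [pvWrite, List.foldl_cons, hgoalF]
      · simp [Bool.or_assoc]
    · -- zero: state unchanged
      have hq0 : (pvNZfrom m c j n).length = q1 := by
        rw [hsucc]; simp [hz, ← hq1]
      dsimp only
      rw [hvread, if_neg hz, ← hq0]
      exact ih (by omega) m' fl (fun i hi => hrows i (by omega))

theorem pvAny_congr {l : List Nat} {p q : Nat → Bool} (h : ∀ x ∈ l, p x = q x) :
    l.any p = l.any q := by
  induction l with
  | nil => rfl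
  | cons a t ih =>
    simp only [List.any_cons, h a (List.mem_cons_self), ih (fun x hx => h x (List.mem_cons_of_mem a hx))]

theorem pvWrite_congr (c : Nat) (f g : Nat → Int) (rs : List Nat) (m : List (List Int))
    (h : ∀ r ∈ rs, f r = g r) : pvWrite c f rs m = pvWrite c g rs m := by
  induction rs generalizing m with
  | nil => rfl
  | cons a t ih =>
    simp only [pvWrite, List.foldl_cons, h a (List.mem_cons_self)]
    exact ih _ (fun r hr => h r (List.mem_cons_of_mem a hr))

theorem pvWriteFold (c : Nat) (f : Nat → Int) :
    ∀ (rs : List Nat), rs.Nodup → ∀ (m : List (List Int)) (fl : Bool),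
    rs.foldl (fun st2 r => (pvCellSet st2.1 r c (f r), st2.2 || pvDiff st2.1 c f r)) (m, fl)
      = (pvWrite c f rs m, fl || rs.any (pvDiff m c f)) := by
  intro rs
  induction rs with
  | nil => intro _ m fl; simp [pvWrite]
  | cons a t ih =>
    intro hnd m fl
    have hat : a ∉ t := (List.nodup_cons.mp hnd).1
    simp only [List.foldl_cons]
    rw [ih (List.nodup_cons.mp hnd).2]
    have hany : t.any (pvDiff (pvCellSet m a c (f a)) c f) = t.any (pvDiff m c f) :=
      pvAny_congr (fun x hx => by
        simp only [pvDiff, pvCellGet_set_ne m a c (f a) x c (fun hh => hat (hh ▸ hx))])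
    rw [hany]
    simp [pvWrite, Bool.or_assoc]

-- collecting the non-zero values bottom-up
theorem pvCollect (m : List (List Int)) (c : Nat) :
    ∀ (rs : List Nat) (acc : List Int),
    rs.foldl (fun acc (linha : Nat) =>
        if pvCellGet m linha c ≠ 0 then acc ++ [pvCellGet m linha c] else acc) acc
      = acc ++ (rs.map (fun r => pvCellGet m r c)).filter (fun v => decide (v ≠ 0)) := by
  intro rs
  induction rs with
  | nil => intro acc; simp
  | cons a t ih =>
    intro acc
    simp only [List.foldl_cons, List.map_cons, List.filter_cons]
    by_cases hz : pvCellGet m a c ≠ 0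
    · rw [if_pos hz, ih]; simp [hz]
    · rw [if_neg hz, ih]
      have hz0 : pvCellGet m a c = 0 := by simpa using hz
      simp [hz0]

theorem pvVals_eq (m : List (List Int)) (c n : Nat) :
    (List.range n).reverse.foldl (fun acc (linha : Nat) =>
        if pvCellGet m linha c ≠ 0 then acc ++ [pvCellGet m linha c] else acc) []
      = (pvNZ m c n).reverse := by
  rw [pvCollect]
  simp [pvNZ, pvNZfrom, ← List.map_reverse, ← List.filter_reverse, List.range_eq_range']

-- A's index arithmetic into the reversed list is the slid-down column
def pvFA (m : List (List Int)) (c n : Nat) (r : Nat) : Int :=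
  if (r : Int) ≥ (n : Int) - (((pvNZ m c n).reverse.length : Nat) : Int) then
    PySem.List.pyGetD ((pvNZ m c n).reverse)
      ((((pvNZ m c n).reverse.length : Nat) : Int) - 1
        - ((r : Int) - ((n : Int) - (((pvNZ m c n).reverse.length : Nat) : Int)))) 0
  else 0

theorem pvFA_eq (m : List (List Int)) (c n r : Nat) (hr : r < n) :
    pvFA m c n r = pvF m c n r := by
  rw [pvFA]
  have hk : (pvNZ m c n).length ≤ n := pvNZ_len_le m c n
  set k := (pvNZ m c n).length with hkdef
  rw [List.length_reverse]
  by_cases hc : n ≤ r + k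
  · rw [if_pos (by omega), pvF, if_pos hc]
    have h0 : (0 : Int) ≤ (k : Int) - 1 - ((r : Int) - ((n : Int) - (k : Int))) := by omega
    have hlt : (k : Int) - 1 - ((r : Int) - ((n : Int) - (k : Int))) < ((pvNZ m c n).reverse.length : Int) := by
      rw [List.length_reverse]; omega
    rw [PySem.List.pyGetD_eq_getElem _ 0 h0 (by simpa using hlt)]
    have hidx : ((k : Int) - 1 - ((r : Int) - ((n : Int) - (k : Int)))).toNat < (pvNZ m c n).reverse.length := by
      rw [List.length_reverse]; omega
    rw [List.getElem_reverse]
    have hi2 : r - (n - k) < k := by omega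
    rw [List.getD_eq_getElem _ 0 (by omega : r - (n - k) < (pvNZ m c n).length)]
    congr 1
    rw [← hkdef]
    omega
  · rw [if_neg (by omega), pvF, if_neg hc]

theorem pvNZfrom_self (m : List (List Int)) (c n : Nat) : pvNZfrom m c n n = [] := by
  simp [pvNZfrom]

theorem pvPyRange_down (n k : Nat) (hk : k ≤ n) :
    PySem.List.pyRange ((n : Int) - 1 - (k : Int)) (-1) (-1)
      = List.map (fun r : Nat => (r : Int)) ((List.range (n - k)).reverse) := by
  rw [PySem.List.pyRange_neg_one_eq_reverse]
  have h2 : (-1 : Int) + 1 = 0 := by norm_num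
  have h3 : (n : Int) - 1 - (k : Int) + 1 = ((n - k : Nat) : Int) := by omega
  rw [h2, h3, PySem.List.pyRange_one]
  have h4 : (((n - k : Nat) : Int) - 0).toNat = n - k := by omega
  rw [h4, List.map_reverse]
  congr 1
  exact List.map_congr_left (fun a _ => by omega)

theorem pvCol_eq (n : Nat) (st : List (List Int) × Bool) (coluna : Nat) :
    (let vals : List Int := (List.range n).reverse.foldl
      (fun acc (linha : Nat) => if pvCellGet st.1 linha coluna ≠ 0 then acc ++ [pvCellGet st.1 linha coluna] else acc) []
     (List.range n).reverse.foldl (fun st2 (linha : Nat) =>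
      if (linha : Int) ≥ (n : Int) - (vals.length : Int) then
        let v := PySem.List.pyGetD vals ((vals.length : Int) - 1 - ((linha : Int) - ((n : Int) - (vals.length : Int)))) 0
        (pvCellSet st2.1 linha coluna v, st2.2 || decide (pvCellGet st2.1 linha coluna ≠ v))
      else
        (pvCellSet st2.1 linha coluna 0, st2.2 || decide (pvCellGet st2.1 linha coluna ≠ 0))) st)
    = (let p1 := (List.range n).reverse.foldl
        (fun (st2 : (List (List Int) × Bool) × Int) (linha : Nat) =>
          let valor := pvCellGet st2.1.1 linha coluna
          if valor ≠ 0 then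
            ((pvCellSet st2.1.1 st2.2.toNat coluna valor,
              st2.1.2 || decide (pvCellGet st2.1.1 st2.2.toNat coluna ≠ valor)), st2.2 - 1)
          else st2)
        (st, (n : Int) - 1)
       (PySem.List.pyRange p1.2 (-1) (-1)).foldl
        (fun st2 (linha : Int) =>
          (pvCellSet st2.1 linha.toNat coluna 0, st2.2 || decide (pvCellGet st2.1 linha.toNat coluna ≠ 0)))
        p1.1) := by
  obtain ⟨m, fl⟩ := st
  have hk : (pvNZ m coluna n).length ≤ n := pvNZ_len_le m coluna n
  set k := (pvNZ m coluna n).length with hkdef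
  have hnd : ((List.range n).reverse).Nodup := List.nodup_reverse.mpr (List.nodup_range)
  dsimp only
  rw [pvVals_eq m coluna n]
  have hlamA : (fun (st2 : List (List Int) × Bool) (linha : Nat) =>
      if (linha : Int) ≥ (n : Int) - (((pvNZ m coluna n).reverse.length : Nat) : Int) then
        let v := PySem.List.pyGetD ((pvNZ m coluna n).reverse)
          ((((pvNZ m coluna n).reverse.length : Nat) : Int) - 1
            - ((linha : Int) - ((n : Int) - (((pvNZ m coluna n).reverse.length : Nat) : Int)))) 0
        (pvCellSet st2.1 linha coluna v, st2.2 || decide (pvCellGet st2.1 linha coluna ≠ v))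
      else
        (pvCellSet st2.1 linha coluna 0, st2.2 || decide (pvCellGet st2.1 linha coluna ≠ 0)))
      = (fun st2 r => (pvCellSet st2.1 r coluna (pvFA m coluna n r),
          st2.2 || pvDiff st2.1 coluna (pvFA m coluna n) r)) := by
    funext st2 r
    by_cases hc : (r : Int) ≥ (n : Int) - (((pvNZ m coluna n).reverse.length : Nat) : Int)
    · simp only [pvFA, pvDiff, if_pos hc]
    · simp only [pvFA, pvDiff, if_neg hc]
  rw [hlamA, pvWriteFold coluna (pvFA m coluna n) _ hnd m fl]
  have hmemn : ∀ r ∈ (List.range n).reverse, r < n := by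
    intro r hr; exact List.mem_range.mp (List.mem_reverse.mp hr)
  rw [pvWrite_congr coluna (pvFA m coluna n) (pvF m coluna n) _ m
    (fun r hr => pvFA_eq m coluna n r (hmemn r hr))]
  have hanyA : ((List.range n).reverse.any (pvDiff m coluna (pvFA m coluna n)))
      = (List.range n).reverse.any (pvDiff m coluna (pvF m coluna n)) :=
    pvAny_congr (fun r hr => by
      simp only [pvDiff, pvFA_eq m coluna n r (hmemn r hr)])
  rw [hanyA]
  -- RHS
  rw [show ((((m, fl) : List (List Int) × Bool), (n : Int) - 1))
      = (((m, fl) : List (List Int) × Bool), (n : Int) - 1 - ((pvNZfrom m coluna n n).length : Int)) from by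
    rw [pvNZfrom_self]; norm_num]
  rw [pvPhase1 m coluna n n le_rfl m fl (fun i _ => rfl)]
  dsimp only
  simp only [pvNZfrom_self, List.length_nil, Nat.sub_zero, ← hkdef]
  rw [pvPyRange_down n k hk, List.foldl_map]
  have hlamB : (fun (st2 : List (List Int) × Bool) (r : Nat) =>
      (pvCellSet st2.1 ((r : Int)).toNat coluna 0,
        st2.2 || decide (pvCellGet st2.1 ((r : Int)).toNat coluna ≠ 0)))
      = (fun st2 r => (pvCellSet st2.1 r coluna ((fun _ => (0 : Int)) r),
          st2.2 || pvDiff st2.1 coluna (fun _ => (0 : Int)) r)) := by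
    funext st2 r
    simp [pvDiff]
  rw [hlamB]
  rw [pvWriteFold coluna (fun _ => (0 : Int)) _ (List.nodup_reverse.mpr List.nodup_range)]
  have hmem2 : ∀ r ∈ (List.range (n - k)).reverse, r < n - k :=
    fun r hr => List.mem_range.mp (List.mem_reverse.mp hr)
  have hnotin : ∀ r ∈ (List.range (n - k)).reverse, r ∉ (List.range' (n - k) k).reverse := by
    intro r hr hmem
    have h1 := hmem2 r hr
    have h2 := (List.mem_range'_1.mp (List.mem_reverse.mp hmem)).1
    omega
  have hF0 : ∀ r ∈ (List.range (n - k)).reverse, (fun _ => (0 : Int)) r = pvF m coluna n r := by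
    intro r hr
    have h1 := hmem2 r hr
    rw [pvF, if_neg (by rw [← hkdef]; omega)]
  rw [pvWrite_congr coluna (fun _ => (0 : Int)) (pvF m coluna n) _ _ hF0]
  have hany2 : ((List.range (n - k)).reverse.any
        (pvDiff (pvWrite coluna (pvF m coluna n) (List.range' (n - k) k).reverse m) coluna (fun _ => (0 : Int))))
      = (List.range (n - k)).reverse.any (pvDiff m coluna (pvF m coluna n)) := by
    refine pvAny_congr (fun r hr => ?_)
    have hrow := pvRow_write_not_mem coluna (pvF m coluna n) ((List.range' (n - k) k).reverse) m r (hnotin r hr)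
    simp only [pvRow] at hrow
    have hcell : pvCellGet (pvWrite coluna (pvF m coluna n) (List.range' (n - k) k).reverse m) r coluna
        = pvCellGet m r coluna := by
      simp only [pvCellGet, hrow]
    simp only [pvDiff, hcell, ← hF0 r hr]
  rw [hany2]
  have hwapp : pvWrite coluna (pvF m coluna n)
        ((List.range' (n - k) k).reverse ++ (List.range (n - k)).reverse) m
      = pvWrite coluna (pvF m coluna n) ((List.range (n - k)).reverse)
          (pvWrite coluna (pvF m coluna n) ((List.range' (n - k) k).reverse) m) := by
    simp [pvWrite, List.foldl_append]
  have hsplitr : (List.range' (n - k) k).reverse ++ (List.range (n - k)).reverse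
      = (List.range n).reverse := by
    rw [← List.reverse_append]
    congr 1
    rw [List.range_eq_range', List.range_eq_range']
    have := List.range'_append (s := 0) (m := n - k) (n := k) (step := 1)
    simpa [Nat.sub_add_cancel hk] using this
  rw [← hwapp, hsplitr]
  rw [Bool.or_assoc, ← List.any_append, hsplitr]

theorem pvMain (matriz : List (List Int)) :
    deslizar_para_baixo matriz = deslizar_para_baixo_alt matriz := by
  unfold deslizar_para_baixo deslizar_para_baixo_alt
  dsimp only
  congr 1
  funext st coluna
  exact pvCol_eq matriz.length st coluna

-- ===== VERDICT (by name: the statement is the Claim_ definition above) =====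
theorem deslizar_para_baixo_spec : Claim_equal_deslizar_para_baixo := by
  intro matriz _ _
  show deslizar_para_baixo matriz = deslizar_para_baixo_alt matriz
  exact pvMain matriz
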